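/- GENERATED by tools/from_farm_form.py from prooffarm-gif/accepted/DGifGetRecordType.1/Proof.lean (a worked proof of the farm's unit `DGifGetRecordType.1`,
   accepted by the verdict) — do not edit. -/
import Gif.Spec.Units.DGifGetRecordType_1
import Gif.Spec.AllSegs
import Gif.Spec.Proved.DGifGetRecordType_1_Lemmas

open X86 X86.User Asan ProgX.Base ProgX.Base.Spec Gif.Spec

/-!
  `DGifGetRecordType.1` (0x108bc9 … 0x108bf5 and 0x108c0e … 0x108c3e, 25 instructions; dgif_lib.c:327-338): A BODY SEGMENT OF A
  PROTECTED FUNCTION WITH A CALL IN THE MIDDLE. The call's return address 0x108c20 (`ret4`) is not a cut of the design, so the unit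
  makes it one of its own: a private assertion `rt1_AtRet4` (`Body` + what is live there) and two walks (Lemmas.lean), chained here.
-/

/-- Segment 1 of `DGifGetRecordType` takes `Start` at 0x108bc9 to `Done` at 0x108bf5 or to `AfterRead` at 0x108c3e. -/
theorem Gif.Spec.Proved.DGifGetRecordType_1_ok : Gif.Spec.DGifGetRecordType_1.Statement := by
  intro Lay hLay μ hμ u₀ hcode h_InternalRead h_asan_load8_noabort h_asan_load4_noabort h_asan_store4_noabort
    H rest frames F R e ret v hat
  -- the callee's contract for the frame list of the body (the own frame in front) and the request of 1 byte
  have hir := h_InternalRead H rest (DGifGetRecordType.framesIn frames e) F R 1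
  -- 0x108bc9 … the two checked loads … the call … 0x108c20
  refine (Gif.Spec.DGifGetRecordType_1.rt1_seg_call Lay hLay μ hμ u₀ hcode H rest frames F R e ret hir
    h_asan_load8_noabort h_asan_load4_noabort v hat).trans ?_
  -- 0x108c20 … 0x108c3e (one byte read) or 0x108bf5 (the read failed)
  intro v1 hv1
  exact Gif.Spec.DGifGetRecordType_1.rt1_seg_tail Lay hLay μ hμ u₀ hcode H rest frames F R e ret
    h_asan_store4_noabort v1 hv1
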